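-- pv_equiv track=rewrite | github.com/mmooyyii/mmooyyii | codes/search_in_text.py | split_by_char
-- ===== SOURCE A (Python) =====
-- def split_by_char(chars, text):
--     tmp = []
--     for i, char in enumerate(text):
--         if char in chars:
--             if tmp:
--                 yield i - len(tmp), ''.join(tmp)
--                 tmp = []
--         else:
--             tmp.append(char)
--     if tmp:
--         yield len(text) - len(tmp), ''.join(tmp)
-- ===== SOURCE B (Python) =====
-- def split_by_char(chars, text):
--     # Run-based two-pointer scan: skip delimiters, then slice out the whole
--     # maximal run at once, instead of a per-character accumulator with flushes.
--     n = len(text)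
--     i = 0
--     while i < n:
--         if text[i] in chars:
--             i += 1
--         else:
--             j = i
--             while j < n and text[j] not in chars:
--                 j += 1
--             yield i, text[i:j]
--             i = j
-- ===== Notes on version B (the rewrite author's own statement) =====
-- stated objective: alternative
-- what changed: Replaced the per-character accumulator with flush-on-delimiter by a two-pointer run scan that skips delimiters and slices each maximal non-delimiter run out of the text in one step.
import Mathlib
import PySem

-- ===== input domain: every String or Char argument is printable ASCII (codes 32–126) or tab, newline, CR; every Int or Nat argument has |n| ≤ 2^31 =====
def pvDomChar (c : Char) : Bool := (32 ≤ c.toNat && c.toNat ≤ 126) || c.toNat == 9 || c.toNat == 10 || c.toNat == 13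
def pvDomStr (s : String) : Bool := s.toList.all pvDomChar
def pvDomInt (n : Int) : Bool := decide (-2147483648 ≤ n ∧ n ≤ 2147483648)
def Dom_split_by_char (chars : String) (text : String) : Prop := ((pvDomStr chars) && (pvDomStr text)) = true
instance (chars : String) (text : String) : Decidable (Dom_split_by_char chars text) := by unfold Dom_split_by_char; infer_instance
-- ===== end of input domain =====

-- B replaces A's per-character accumulator (flushing on each delimiter) by a
-- two-pointer run scan that skips delimiters and slices out each maximal
-- non-delimiter run in one step (objective: alternative decomposition).
-- A and B are Python generators; equivalence is about the yielded sequence.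

-- ===== PORT A =====
-- the loop body of A: state = (tmp, yielded-so-far), input = (i, char)
def pvAStep (cl : List Char) (st : List Char × List (Int × String)) (ic : Int × Char) :
    List Char × List (Int × String) :=
  if ic.2 ∈ cl then
    if st.1 ≠ [] then ([], st.2 ++ [(ic.1 - (st.1.length : Int), String.mk st.1)]) else st
  else (st.1 ++ [ic.2], st.2)

def split_by_char (chars : String) (text : String) : List (Int × String) :=
  let cl := chars.toList
  let st := (PySem.List.enumerate text.toList 0).foldl (pvAStep cl) ([], [])
  if st.1 ≠ [] then
    st.2 ++ [((text.toList.length : Int) - (st.1.length : Int), String.mk st.1)]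
  else st.2

-- ===== PORT B =====
-- B's while loop: skip a delimiter, or emit the maximal run starting here.
def pvBGo (cl : List Char) : List Char → Int → List (Int × String)
  | [], _ => []
  | c :: rest, i =>
    if c ∈ cl then pvBGo cl rest (i + 1)
    else
      let t := rest.takeWhile (fun d => !decide (d ∈ cl))
      (i, String.mk (c :: t)) ::
        pvBGo cl (rest.dropWhile (fun d => !decide (d ∈ cl))) (i + 1 + t.length)
  termination_by l => l.length
  decreasing_by
    · simp
    · have := (List.dropWhile_sublist (l := rest) (p := fun d => !decide (d ∈ cl))).length_le
      simp; omega

def split_by_char_alt (chars : String) (text : String) : List (Int × String) :=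
  pvBGo chars.toList text.toList 0

-- ===== PRECONDITION & SPEC =====
def Spec_split_by_char (chars : String) (text : String) (out : List (Int × String)) : Prop := out = split_by_char_alt chars text
instance (chars : String) (text : String) (out : List (Int × String)) : Decidable (Spec_split_by_char chars text out) := by unfold Spec_split_by_char; infer_instance

-- ===== CLAIM (what is proved, stated in full; the proofs are below) =====
def Claim_equal_split_by_char : Prop := ∀ (chars : String) (text : String), Dom_split_by_char chars text → Spec_split_by_char chars text (split_by_char chars text)

-- ===== LEMMAS AND PROOFS =====

-- recursive characterisation of A's fold (i = current index, tmp = pending run)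
def pvGoA (cl : List Char) : List Char → Int → List Char → List (Int × String)
  | [], i, tmp => if tmp ≠ [] then [(i - (tmp.length : Int), String.mk tmp)] else []
  | c :: rest, i, tmp =>
    if c ∈ cl then
      if tmp ≠ [] then (i - (tmp.length : Int), String.mk tmp) :: pvGoA cl rest (i + 1) []
      else pvGoA cl rest (i + 1) []
    else pvGoA cl rest (i + 1) (tmp ++ [c])

-- B's result with a pending run `tmp` (starting at i - |tmp|) prepended/merged
def pvMerge (cl : List Char) (tmp : List Char) (i : Int) (l : List Char) : List (Int × String) :=
  let t := l.takeWhile (fun d => !decide (d ∈ cl))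
  let r := l.dropWhile (fun d => !decide (d ∈ cl))
  if tmp ++ t = [] then pvBGo cl r (i + t.length)
  else (i - (tmp.length : Int), String.mk (tmp ++ t)) :: pvBGo cl r (i + t.length)

lemma pvBGo_eq_merge (cl : List Char) (l : List Char) (i : Int) :
    pvBGo cl l i = pvMerge cl [] i l := by
  cases l with
  | nil => simp [pvBGo, pvMerge]
  | cons c rest =>
    by_cases h : c ∈ cl
    · simp [pvBGo, pvMerge, h]
    · rw [pvBGo]
      simp only [pvMerge, h, if_neg h]
      simp only [List.takeWhile_cons, List.dropWhile_cons, decide_eq_true_eq, h,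
        not_false_eq_true, decide_true, Bool.not_true, Bool.not_false, if_true]
      simp
      congr 1
      push_cast; ring

lemma pvGoA_eq_merge (cl : List Char) (l : List Char) (i : Int) (tmp : List Char) :
    pvGoA cl l i tmp = pvMerge cl tmp i l := by
  induction l generalizing i tmp with
  | nil =>
    by_cases ht : tmp = [] <;>
      simp [pvGoA, pvMerge, pvBGo, ht]
  | cons c rest ih =>
    by_cases h : c ∈ cl
    · have hB : pvBGo cl (c :: rest) i = pvBGo cl rest (i + 1) := by
        rw [pvBGo]; simp [h]
      by_cases ht : tmp = []
      · subst ht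
        have hA : pvGoA cl (c :: rest) i [] = pvGoA cl rest (i + 1) [] := by
          rw [pvGoA]; simp [h]
        rw [hA, ih, ← pvBGo_eq_merge, ← hB, pvBGo_eq_merge]
      · have hA : pvGoA cl (c :: rest) i tmp
            = (i - (tmp.length : Int), String.mk tmp) :: pvGoA cl rest (i + 1) [] := by
          rw [pvGoA]; simp [h, ht]
        rw [hA, ih, ← pvBGo_eq_merge, ← hB]
        simp [pvMerge, h, ht]
    · rw [pvGoA]
      simp only [h, if_false, if_neg h, ih]
      simp only [pvMerge, List.takeWhile_cons, List.dropWhile_cons, h,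
        not_false_eq_true, decide_true, Bool.not_true, Bool.not_false, if_true]
      simp
      congr 1
      push_cast; ring

lemma pvFoldA (cl : List Char) (l : List Char) (i : Int) (tmp : List Char)
    (acc : List (Int × String)) :
    (let st := (PySem.List.enumerate l i).foldl (pvAStep cl) (tmp, acc)
     if st.1 ≠ [] then
       st.2 ++ [((i + (l.length : Int)) - (st.1.length : Int), String.mk st.1)]
     else st.2)
    = acc ++ pvGoA cl l i tmp := by
  induction l generalizing i tmp acc with
  | nil =>
    simp only [PySem.List.enumerate_nil, List.foldl_nil, pvGoA]
    by_cases ht : tmp = [] <;> simp [ht]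
  | cons c rest ih =>
    rw [PySem.List.enumerate_cons]
    simp only [List.foldl_cons]
    have harith : i + ((c :: rest).length : Int) = (i + 1) + (rest.length : Int) := by
      push_cast [List.length_cons]; ring
    by_cases h : c ∈ cl
    · by_cases ht : tmp = []
      · subst ht
        have hstep : pvAStep cl ([], acc) (i, c) = ([], acc) := by
          simp [pvAStep, h]
        rw [hstep, harith, ih]
        rw [pvGoA]
        simp [h]
      · have hstep : pvAStep cl (tmp, acc) (i, c)
            = ([], acc ++ [(i - (tmp.length : Int), String.mk tmp)]) := by
          simp [pvAStep, h, ht]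
        rw [hstep, harith, ih]
        rw [pvGoA]
        simp [h, ht]
    · have hstep : pvAStep cl (tmp, acc) (i, c) = (tmp ++ [c], acc) := by
        simp [pvAStep, h]
      rw [hstep, harith, ih]
      rw [pvGoA]
      simp [h]

-- ===== VERDICT (by name: the statement is the Claim_ definition above) =====
theorem split_by_char_spec : Claim_equal_split_by_char := by
  intro chars text _
  show split_by_char chars text = split_by_char_alt chars text
  unfold split_by_char split_by_char_alt
  have := pvFoldA chars.toList text.toList 0 [] []
  simp only [zero_add] at this
  rw [this]
  rw [pvGoA_eq_merge, ← pvBGo_eq_merge]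
  simp
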